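-- pv_equiv track=rewrite | github.com/raduConstantinescu/Descriptive-CI-Metrics | maturity-analyzer/popularity_analyzer.py | group_repos_by_age
-- ===== SOURCE A (Python) =====
-- def group_repos_by_age(repo_names, repo_metric_count, ages):
--     age_groups = {}
--     for name, scount, age in zip(repo_names, repo_metric_count, ages):
--         if age in age_groups.keys():
--             age_groups[age].append((name, scount))
--         else:
--             age_groups[age] = [(name, scount)]
--
--     return age_groups
-- ===== SOURCE B (Python) =====
-- def group_repos_by_age(repo_names, repo_metric_count, ages):
--     triples = list(zip(repo_names, repo_metric_count, ages))
--     distinct_ages = list(dict.fromkeys(a for _, _, a in triples))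
--     return {a: [(n, c) for n, c, ag in triples if ag == a]
--             for a in distinct_ages}
-- ===== Notes on version B (the rewrite author's own statement) =====
-- stated objective: alternative
-- what changed: Replaces the single-pass dict-of-growing-lists with a two-phase scheme: first compute the distinct ages in first-occurrence order (dict.fromkeys), then build each group by filtering the zipped triples once per distinct age.
import Mathlib
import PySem

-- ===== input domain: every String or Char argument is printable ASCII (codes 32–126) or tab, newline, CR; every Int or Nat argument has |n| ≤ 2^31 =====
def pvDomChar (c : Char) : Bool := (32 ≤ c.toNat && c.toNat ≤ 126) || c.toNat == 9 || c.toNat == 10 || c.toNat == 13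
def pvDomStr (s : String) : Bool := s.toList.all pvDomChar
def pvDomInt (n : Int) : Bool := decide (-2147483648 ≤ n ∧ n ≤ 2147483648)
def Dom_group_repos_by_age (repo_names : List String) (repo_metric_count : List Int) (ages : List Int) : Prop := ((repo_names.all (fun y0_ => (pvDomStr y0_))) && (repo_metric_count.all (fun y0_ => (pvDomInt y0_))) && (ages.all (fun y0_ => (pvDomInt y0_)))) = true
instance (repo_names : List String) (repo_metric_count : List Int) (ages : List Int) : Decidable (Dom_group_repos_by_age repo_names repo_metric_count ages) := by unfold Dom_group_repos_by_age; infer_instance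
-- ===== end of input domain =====

-- ===== PORT A =====
-- B rebuilds the grouping in two phases (distinct ages, then a filter per age) instead of A's single dict-accumulating pass; alternative decomposition, same results.
def group_repos_by_age (repo_names : List String) (repo_metric_count : List Int) (ages : List Int) : List (Int × List (String × Int)) :=
  let triples := repo_names.zip (repo_metric_count.zip ages)
  let age_groups := triples.foldl (fun d t =>
      if d.contains t.2.2 then d.modify t.2.2 [] (· ++ [(t.1, t.2.1)])
      else d.insert t.2.2 [(t.1, t.2.1)]) PySem.Dict.empty
  age_groups.items

-- ===== PORT B =====
def group_repos_by_age_alt (repo_names : List String) (repo_metric_count : List Int) (ages : List Int) : List (Int × List (String × Int)) :=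
  let triples := repo_names.zip (repo_metric_count.zip ages)
  let distinct_ages := PySem.List.dedup (triples.map (fun t => t.2.2))
  distinct_ages.map (fun a =>
    (a, (triples.filter (fun t => t.2.2 == a)).map (fun t => (t.1, t.2.1))))

-- ===== PRECONDITION & SPEC =====
def Spec_group_repos_by_age (repo_names : List String) (repo_metric_count : List Int) (ages : List Int) (out : List (Int × List (String × Int))) : Prop := out = group_repos_by_age_alt repo_names repo_metric_count ages
instance (repo_names : List String) (repo_metric_count : List Int) (ages : List Int) (out : List (Int × List (String × Int))) : Decidable (Spec_group_repos_by_age repo_names repo_metric_count ages out) := by unfold Spec_group_repos_by_age; infer_instance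

-- ===== CLAIM (what is proved, stated in full; the proofs are below) =====
def Claim_equal_group_repos_by_age : Prop := ∀ (repo_names : List String) (repo_metric_count : List Int) (ages : List Int), Dom_group_repos_by_age repo_names repo_metric_count ages → Spec_group_repos_by_age repo_names repo_metric_count ages (group_repos_by_age repo_names repo_metric_count ages)

-- ===== LEMMAS AND PROOFS =====

-- A's branch "append if present / fresh singleton otherwise" is exactly Dict.modify with default [].
theorem pv_step_eq {κ : Type} [BEq κ] [LawfulBEq κ] (d : PySem.Dict κ (List (String × Int))) (k : κ) (p : String × Int) :
    (if d.contains k then d.modify k [] (· ++ [p]) else d.insert k [p]) = d.modify k [] (· ++ [p]) := by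
  by_cases h : d.contains k
  · simp [h]
  · rw [Bool.not_eq_true] at h
    have h' : (d.items.any fun q => q.1 == k) = false := by
      simpa [PySem.Dict.contains] using h
    have hf : d.items.find? (fun q => q.1 == k) = none := by
      rw [List.find?_eq_none]
      intro q hq
      exact (List.any_eq_false.mp h') q hq
    simp [PySem.Dict.modify, PySem.Dict.getD, PySem.Dict.get?, PySem.Dict.insert, hf]

-- ===== VERDICT (by name: the statement is the Claim_ definition above) =====
theorem group_repos_by_age_spec : Claim_equal_group_repos_by_age := by
  intro ns cs ag _
  unfold Spec_group_repos_by_age group_repos_by_age group_repos_by_age_alt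
  simp only []
  set L := ns.zip (cs.zip ag) with hL
  set P := L.map (fun t => (t.2.2, (t.1, t.2.1))) with hP
  have hfold : (L.foldl (fun d t =>
      if d.contains t.2.2 then d.modify t.2.2 [] (· ++ [(t.1, t.2.1)])
      else d.insert t.2.2 [(t.1, t.2.1)]) PySem.Dict.empty)
      = P.foldl (fun d p => d.modify p.1 [] (· ++ [p.2])) PySem.Dict.empty := by
    rw [hP, List.foldl_map]
    apply PySem.List.foldl_congr_mem
    intro d t _
    exact pv_step_eq d t.2.2 (t.1, t.2.1)
  rw [hfold]
  set D := P.foldl (fun d p => d.modify p.1 [] (· ++ [p.2])) PySem.Dict.empty with hD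
  have hkeys : D.keys = PySem.List.dedup (L.map (fun t => t.2.2)) := by
    rw [hD, PySem.Dict.keys_foldl_modify_key, PySem.Dict.keys_empty, PySem.Set.update_nil_left,
        PySem.List.dedup_eq_ofList, hP, List.map_map]
    rfl
  have hnd : D.keys.Nodup := by
    rw [hkeys]
    exact PySem.List.nodup_dedup _
  have hget : ∀ k, D.getD k [] = (L.filter (fun t => t.2.2 == k)).map (fun t => (t.1, t.2.1)) := by
    intro k
    rw [hD, PySem.Dict.getD_foldl_modify_append, PySem.Dict.getD_empty, List.nil_append, hP,
        List.filter_map, List.map_map]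
    rfl
  rw [PySem.Dict.items_eq_map_keys D hnd [], hkeys]
  apply List.map_congr_left
  intro k _
  rw [hget]
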